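-- pv_equiv track=rewrite | github.com/insult0o/torematrix_labs2 | tore_matrix_labs/core/specialized_toolsets/complex_toolset.py | _is_tabular_content
-- ===== SOURCE A (Python) =====
-- def _is_tabular_content(text: str) -> bool:
--     """Check if text is likely tabular content."""
--     # Look for patterns that suggest tabular data
--     lines = text.split('\n')
--
--     if len(lines) < 2:
--         return False
--
--     # Check for consistent column separators
--     separators = ['\t', '  ', ' | ', '|']
--
--     for sep in separators:
--         if all(sep in line for line in lines if line.strip()):
--             return True
--
--     return False
-- ===== SOURCE B (Python) =====
-- def _is_tabular_content(text: str) -> bool: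
--     """Check if text is likely tabular content."""
--     lines = text.split('\n')
--
--     if len(lines) < 2:
--         return False
--
--     # Single pass: keep only separators present in every non-blank line seen so far.
--     cands = {'\t', '  ', ' | ', '|'}
--     for line in lines:
--         if line.strip():
--             cands = {sep for sep in cands if sep in line}
--     return bool(cands)
-- ===== Notes on version B (the rewrite author's own statement) =====
-- stated objective: alternative
-- what changed: Replaces the outer loop over separators (each re-scanning all lines via all(...)) by a single pass over the lines that intersects a shrinking candidate-separator set, returning whether any candidate survives.
import Mathlib
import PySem

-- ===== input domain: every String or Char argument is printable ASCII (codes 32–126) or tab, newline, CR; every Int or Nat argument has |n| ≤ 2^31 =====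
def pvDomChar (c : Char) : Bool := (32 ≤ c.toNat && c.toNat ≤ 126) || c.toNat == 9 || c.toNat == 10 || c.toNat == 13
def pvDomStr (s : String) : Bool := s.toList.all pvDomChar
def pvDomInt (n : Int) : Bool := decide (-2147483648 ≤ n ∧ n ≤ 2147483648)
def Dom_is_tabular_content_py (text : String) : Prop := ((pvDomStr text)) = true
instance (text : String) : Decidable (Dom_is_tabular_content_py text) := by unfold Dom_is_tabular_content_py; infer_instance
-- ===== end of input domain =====

-- B changes the loop nesting (one pass over the lines intersecting a candidate-separator set,
-- instead of one scan of all lines per separator); same result, similar cost.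

-- ===== PORT A =====
def is_tabular_content_py (text : String) : Bool :=
  let lines := PySem.Chars.splitOn text.toList ['\n']
  if lines.length < 2 then false
  else
    let separators : List (List Char) := [['\t'], [' ', ' '], [' ', '|', ' '], ['|']]
    -- 'for sep in separators: if all(...): return True' ≡ any over separators;
    -- the genexp's 'if line.strip()' filter is the vacuous-true branch below
    separators.any (fun sep =>
      lines.all (fun line =>
        if PySem.Chars.strip line == [] then true else PySem.Chars.isIn sep line))

-- ===== PORT B =====
-- the Python set of candidate separators is kept as the list of its distinct elements;
-- the set comprehension is the filter keeping separators contained in the line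
def is_tabular_content_py_alt (text : String) : Bool :=
  let lines := PySem.Chars.splitOn text.toList ['\n']
  if lines.length < 2 then false
  else
    let final := lines.foldl (fun cands line =>
      if PySem.Chars.strip line == [] then cands
      else cands.filter (fun sep => PySem.Chars.isIn sep line))
      [['\t'], [' ', ' '], [' ', '|', ' '], ['|']]
    !final.isEmpty

-- ===== PRECONDITION & SPEC =====
def Spec_is_tabular_content_py (text : String) (out : Bool) : Prop := out = is_tabular_content_py_alt text
instance (text : String) (out : Bool) : Decidable (Spec_is_tabular_content_py text out) := by unfold Spec_is_tabular_content_py; infer_instance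

-- ===== CLAIM (what is proved, stated in full; the proofs are below) =====
def Claim_equal_is_tabular_content_py : Prop := ∀ (text : String), Dom_is_tabular_content_py text → Spec_is_tabular_content_py text (is_tabular_content_py text)

-- ===== LEMMAS AND PROOFS =====

-- B's fold over the lines computes the filter of the initial candidate list by
-- "contained in every non-blank line".
theorem pv_foldl_filter (lines : List (List Char)) (c : List (List Char)) :
    lines.foldl (fun cands line =>
      if PySem.Chars.strip line == [] then cands
      else cands.filter (fun sep => PySem.Chars.isIn sep line)) c
    = c.filter (fun sep => lines.all (fun line =>
        if PySem.Chars.strip line == [] then true else PySem.Chars.isIn sep line)) := by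
  induction lines generalizing c with
  | nil => simp
  | cons l rest ih =>
    simp only [List.foldl_cons, List.all_cons]
    by_cases h : PySem.Chars.strip l == []
    · rw [if_pos h, ih]
      exact List.filter_congr (fun sep _ => by rw [if_pos h, Bool.true_and])
    · rw [if_neg h, ih, List.filter_filter]
      exact List.filter_congr (fun sep _ => by simp [h, Bool.and_comm])

theorem pv_any_filter {α : Type} (l : List α) (p : α → Bool) :
    (!(l.filter p).isEmpty) = l.any p := by
  induction l with
  | nil => simp
  | cons x xs ih => by_cases h : p x <;> simp [h, ih]

-- ===== VERDICT (by name: the statement is the Claim_ definition above) =====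
theorem is_tabular_content_py_spec : Claim_equal_is_tabular_content_py := by
  intro text _
  unfold Spec_is_tabular_content_py is_tabular_content_py is_tabular_content_py_alt
  by_cases h : (PySem.Chars.splitOn text.toList ['\n']).length < 2
  · simp [h]
  · simp only [h, pv_foldl_filter, pv_any_filter]
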